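-- pv_equiv track=rewrite | github.com/Fondamenti18/fondamenti-di-programmazione | students/1808759/homework04/program01.py | ant
-- ===== SOURCE A (Python) =====
-- def ant(d,diz,nodo,c,y):
--     diz[nodo]=c
--     for z in d[nodo]:
--         if len(d[nodo])==y:
--             ant(d,diz,z,c+1,y)
--         else:
--             ant(d,diz,z,c,y)
--     return diz
-- ===== SOURCE B (Python) =====
-- def ant(d, diz, nodo, c, y):
--     stack = [(nodo, c)]
--     while stack:
--         node, cur = stack.pop()
--         diz[node] = cur
--         ch = d[node]
--         nxt = cur + 1 if len(ch) == y else cur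
--         for z in reversed(ch):
--             stack.append((z, nxt))
--     return diz
-- ===== Notes on version B (the rewrite author's own statement) =====
-- stated objective: alternative
-- what changed: The recursive preorder DFS is replaced by an iterative explicit-stack loop (children pushed in reversed order so pops reproduce the same left-to-right preorder), which also avoids Python's recursion-depth limit on deep trees.
import Mathlib
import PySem

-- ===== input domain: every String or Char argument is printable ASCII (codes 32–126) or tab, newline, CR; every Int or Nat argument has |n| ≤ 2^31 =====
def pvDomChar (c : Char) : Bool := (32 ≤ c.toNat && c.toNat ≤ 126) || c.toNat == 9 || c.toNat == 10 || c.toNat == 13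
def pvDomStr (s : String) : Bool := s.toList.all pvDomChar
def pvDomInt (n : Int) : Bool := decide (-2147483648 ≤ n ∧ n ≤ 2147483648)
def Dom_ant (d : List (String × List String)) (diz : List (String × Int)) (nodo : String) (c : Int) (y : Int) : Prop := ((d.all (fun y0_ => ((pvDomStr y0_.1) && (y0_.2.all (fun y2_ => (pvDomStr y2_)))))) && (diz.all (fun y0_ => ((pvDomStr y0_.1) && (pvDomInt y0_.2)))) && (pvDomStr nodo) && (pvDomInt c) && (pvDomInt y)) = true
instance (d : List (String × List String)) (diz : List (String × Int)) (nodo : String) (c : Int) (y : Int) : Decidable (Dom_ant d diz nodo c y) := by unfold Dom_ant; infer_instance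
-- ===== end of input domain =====

-- ===== PORT A =====
-- B differs from A only in control structure (explicit stack vs recursion); both mutate the
-- Python dict `diz` in place in the same way; the equivalence proved here is about the return value.
-- d[x] lookup (first match; Pre_ restricts to nodup keys, where this is exact Python dict lookup)
def childrenOf (d : List (String × List String)) (x : String) : List String :=
  match d.find? (fun p => p.1 == x) with
  | some p => p.2
  | none => []

-- literal port of A's recursion; `fuel` only totalizes the recursion (Python recurses unboundedly
-- on cyclic input, which Pre_ excludes); d.length + 1 bounds the depth on every input Pre_ admits
def antRec (d : List (String × List String)) (y : Int) :
    Nat → PySem.Dict String Int → String → Int → PySem.Dict String Int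
  | 0, diz, _, _ => diz
  | f + 1, diz, nodo, c =>
      let diz := diz.insert nodo c
      let cs := childrenOf d nodo
      cs.foldl (fun dz z =>
        if ((cs.length : Int) == y) then antRec d y f dz z (c + 1)
        else antRec d y f dz z c) diz

def ant (d : List (String × List String)) (diz : List (String × Int)) (nodo : String) (c : Int) (y : Int) : List (String × Int) :=
  (antRec d y (d.length + 1) (PySem.Dict.mk diz) nodo c).items

-- ===== PORT B =====
def maxDeg : List (String × List String) → Nat
  | [] => 0
  | p :: t => max p.2.length (maxDeg t)

theorem mem_le_maxDeg (d : List (String × List String)) (p : String × List String)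
    (h : p ∈ d) : p.2.length ≤ maxDeg d := by
  induction d with
  | nil => cases h
  | cons q t ih =>
      rw [List.mem_cons] at h
      rcases h with rfl | h
      · simp [maxDeg]
      · exact le_trans (ih h) (by simp [maxDeg])

theorem childrenOf_length_le (d : List (String × List String)) (x : String) :
    (childrenOf d x).length ≤ maxDeg d := by
  unfold childrenOf
  split
  · next p h => exact mem_le_maxDeg d p (List.mem_of_find?_eq_some h)
  · exact Nat.zero_le _

-- literal port of B's while-loop over an explicit stack; the third component is the same
-- totalizing fuel as in antRec, carried per stack entry
def antLoop (d : List (String × List String)) (y : Int) :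
    List (String × Int × Nat) → PySem.Dict String Int → PySem.Dict String Int
  | [], diz => diz
  | (_, _, 0) :: rest, diz => antLoop d y rest diz
  | (node, cur, f + 1) :: rest, diz =>
      let cs := childrenOf d node
      let nxt := if ((cs.length : Int) == y) then cur + 1 else cur
      antLoop d y (cs.map (fun z => (z, nxt, f)) ++ rest) (diz.insert node cur)
  termination_by stack _ => (stack.map (fun e => (maxDeg d + 1) ^ e.2.2)).sum
  decreasing_by
  · simp only [List.map_cons, List.sum_cons, pow_zero]
    omega
  · have h2 : (childrenOf d node).length ≤ maxDeg d := childrenOf_length_le d node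
    have h3 : 1 ≤ (maxDeg d + 1) ^ f := Nat.one_le_pow _ _ (by omega)
    have h1 : (List.map (fun (_ : String) => (maxDeg d + 1) ^ f) (childrenOf d node)).sum
        = (childrenOf d node).length * (maxDeg d + 1) ^ f := by
      induction childrenOf d node with
      | nil => simp
      | cons a t iht => simp only [List.map_cons, List.sum_cons, List.length_cons, iht]; ring
    have h4 : (maxDeg d + 1) ^ (f + 1) = (maxDeg d + 1) ^ f * (maxDeg d + 1) := pow_succ _ _
    have h5 : (childrenOf d node).length * (maxDeg d + 1) ^ f < (maxDeg d + 1) ^ (f + 1) := by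
      nlinarith
    simp only [List.map_append, List.sum_append, List.map_map, Function.comp_def,
      List.map_cons, List.sum_cons, Nat.succ_eq_add_one]
    rw [h1]
    omega

def ant_alt (d : List (String × List String)) (diz : List (String × Int)) (nodo : String) (c : Int) (y : Int) : List (String × Int) :=
  (antLoop d y [(nodo, c, d.length + 1)] (PySem.Dict.mk diz)).items

-- ===== PRECONDITION & SPEC =====
-- reachability helpers for Pre_ (closed-form graph conditions on the input, not a run of the ports)
def reachStep (d : List (String × List String)) (S : List String) : List String :=
  PySem.List.dedup (S ++ S.flatMap (childrenOf d))

def reachFrom (d : List (String × List String)) (S : List String) : List String :=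
  (reachStep d)^[d.length + 2] S

-- Pre_ excludes exactly the inputs on which Python's ant raises or diverges, plus the
-- assoc-list encodings with duplicate dict keys (a Python dict cannot have them; on such lists
-- the ports' first-match lookup is an artefact of the encoding).
def Pre_ant (d : List (String × List String)) (diz : List (String × Int)) (nodo : String) (c : Int) (y : Int) : Prop :=
  (d.map Prod.fst).Nodup ∧ (diz.map Prod.fst).Nodup ∧
  (∀ x ∈ reachFrom d [nodo], x ∈ d.map Prod.fst) ∧
  (∀ x ∈ reachFrom d [nodo], x ∉ reachFrom d (childrenOf d x))
instance (d : List (String × List String)) (diz : List (String × Int)) (nodo : String) (c : Int) (y : Int) : Decidable (Pre_ant d diz nodo c y) := by unfold Pre_ant; infer_instance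

def pvWitness_ant : (List (String × List String)) × (List (String × Int)) × String × Int × Int :=
  ([("a", ["b", "c"]), ("b", []), ("c", [])], [("z", 7)], "a", 0, 2)

def Spec_ant (d : List (String × List String)) (diz : List (String × Int)) (nodo : String) (c : Int) (y : Int) (out : List (String × Int)) : Prop := out = ant_alt d diz nodo c y
instance (d : List (String × List String)) (diz : List (String × Int)) (nodo : String) (c : Int) (y : Int) (out : List (String × Int)) : Decidable (Spec_ant d diz nodo c y out) := by unfold Spec_ant; infer_instance

-- ===== CLAIM (what is proved, stated in full; the proofs are below) =====
def Claim_equal_ant : Prop := ∀ (d : List (String × List String)) (diz : List (String × Int)) (nodo : String) (c : Int) (y : Int), Dom_ant d diz nodo c y → Pre_ant d diz nodo c y → Spec_ant d diz nodo c y (ant d diz nodo c y)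

-- ===== LEMMAS AND PROOFS =====
-- the stack segment for a child list is the foldl over antRec, given the inductive hypothesis
theorem antLoop_map (d : List (String × List String)) (y : Int) (f : Nat) (nxt : Int)
    (H : ∀ (nodo : String) (c : Int) (rest : List (String × Int × Nat))
      (diz : PySem.Dict String Int),
      antLoop d y ((nodo, c, f) :: rest) diz = antLoop d y rest (antRec d y f diz nodo c)) :
    ∀ (cs : List String) (rest : List (String × Int × Nat)) (diz : PySem.Dict String Int),
      antLoop d y (cs.map (fun z => (z, nxt, f)) ++ rest) diz
        = antLoop d y rest (cs.foldl (fun dz z => antRec d y f dz z nxt) diz) := by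
  intro cs
  induction cs with
  | nil => intro rest diz; simp
  | cons z t iht =>
      intro rest diz
      simp only [List.map_cons, List.cons_append, List.foldl_cons]
      rw [H z nxt (t.map (fun z => (z, nxt, f)) ++ rest) diz]
      exact iht rest (antRec d y f diz z nxt)

-- the stack machine run on (node, c, f) :: rest is the recursion at fuel f, then the rest
theorem antLoop_antRec (d : List (String × List String)) (y : Int) :
    ∀ (f : Nat) (nodo : String) (c : Int) (rest : List (String × Int × Nat))
      (diz : PySem.Dict String Int),
      antLoop d y ((nodo, c, f) :: rest) diz = antLoop d y rest (antRec d y f diz nodo c) := by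
  intro f
  induction f with
  | zero => intro nodo c rest diz; rw [antLoop]; rfl
  | succ f ih =>
      intro nodo c rest diz
      rw [antLoop, antRec]
      have hif : (fun (dz : PySem.Dict String Int) (z : String) =>
            if (((childrenOf d nodo).length : Int) == y) then antRec d y f dz z (c + 1)
            else antRec d y f dz z c)
          = (fun dz z => antRec d y f dz z
              (if (((childrenOf d nodo).length : Int) == y) then c + 1 else c)) := by
        funext dz z
        by_cases h : (((childrenOf d nodo).length : Int) == y) <;> simp [h]
      rw [hif]
      generalize (if (((childrenOf d nodo).length : Int) == y) then c + 1 else c) = nxt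
      exact antLoop_map d y f nxt ih (childrenOf d nodo) rest (diz.insert nodo c)

-- ===== VERDICT (by name: the statement is the Claim_ definition above) =====
theorem ant_spec : Claim_equal_ant := by
  intro d diz nodo c y _ _
  unfold Spec_ant ant ant_alt
  rw [antLoop_antRec d y (d.length + 1) nodo c [] (PySem.Dict.mk diz)]
  rw [antLoop]
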